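-- pv_equiv track=rewrite | github.com/izukuuuu/opinion-system | backend/src/report/worker.py | _deep_todos_snapshot
-- ===== SOURCE A (Python) =====
-- from typing import Any, Dict
--
-- def _deep_todos_snapshot(stage: str) -> list[Dict[str, Any]]:
--     order = ["scope", "retrieval", "evidence", "structure", "writing", "validation", "persist"]
--     labels = {
--         "scope": "范围确认",
--         "retrieval": "检索路由",
--         "evidence": "证据整理",
--         "structure": "结构分析",
--         "writing": "文稿生成",
--         "validation": "质量校验",
--         "persist": "审批与存储",
--     }
--     progress_map = {
--         "interpret": {"scope": "completed", "retrieval": "running", "evidence": "pending", "structure": "pending", "writing": "pending", "validation": "pending", "persist": "pending"},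
--         "review": {"scope": "completed", "retrieval": "completed", "evidence": "completed", "structure": "completed", "writing": "running", "validation": "pending", "persist": "pending"},
--         "persist": {"scope": "completed", "retrieval": "completed", "evidence": "completed", "structure": "completed", "writing": "completed", "validation": "completed", "persist": "running"},
--         "completed": {"scope": "completed", "retrieval": "completed", "evidence": "completed", "structure": "completed", "writing": "completed", "validation": "completed", "persist": "completed"},
--     }
--     selected = progress_map.get(stage, progress_map["interpret"])
--     return [{"id": item, "label": labels[item], "status": selected[item]} for item in order]
-- ===== SOURCE B (Python) =====
-- def _deep_todos_snapshot(stage: str):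
--     order = ["scope", "retrieval", "evidence", "structure", "writing", "validation", "persist"]
--     labels = {
--         "scope": "范围确认",
--         "retrieval": "检索路由",
--         "evidence": "证据整理",
--         "structure": "结构分析",
--         "writing": "文稿生成",
--         "validation": "质量校验",
--         "persist": "审批与存储",
--     }
--     boundary = {"interpret": 1, "review": 4, "persist": 6, "completed": 7}.get(stage, 1)
--     out = []
--     for i, item in enumerate(order):
--         if i < boundary:
--             status = "completed"
--         elif i == boundary:
--             status = "running"
--         else:
--             status = "pending"
--         out.append({"id": item, "label": labels[item], "status": status})
--     return out
-- ===== Notes on version B (the rewrite author's own statement) =====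
-- stated objective: simpler
-- what changed: Replaces A's four hand-written per-stage status tables with a single stage-to-boundary-index map and derives each item's status by comparing its position to the boundary (completed below, running at, pending above), building the list in one enumerate loop.
import Mathlib
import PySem

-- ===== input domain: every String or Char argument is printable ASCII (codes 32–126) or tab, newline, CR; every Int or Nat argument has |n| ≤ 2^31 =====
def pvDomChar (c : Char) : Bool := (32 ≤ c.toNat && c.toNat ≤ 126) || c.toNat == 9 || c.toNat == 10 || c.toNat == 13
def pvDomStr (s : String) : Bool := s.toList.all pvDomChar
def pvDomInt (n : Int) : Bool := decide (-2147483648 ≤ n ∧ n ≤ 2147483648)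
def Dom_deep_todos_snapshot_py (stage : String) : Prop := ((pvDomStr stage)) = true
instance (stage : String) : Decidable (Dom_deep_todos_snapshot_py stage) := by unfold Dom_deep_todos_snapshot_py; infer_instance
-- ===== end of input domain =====

-- B rebuilds the snapshot from a single boundary index per stage (completed/running/pending by
-- position) instead of A's full per-stage status tables: simpler, not faster.


-- ===== PORT A =====
def pvOrderA : List String := ["scope", "retrieval", "evidence", "structure", "writing", "validation", "persist"]

def pvLabelsA : PySem.Dict String String := PySem.Dict.ofList
  [("scope", "范围确认"), ("retrieval", "检索路由"), ("evidence", "证据整理"),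
   ("structure", "结构分析"), ("writing", "文稿生成"), ("validation", "质量校验"),
   ("persist", "审批与存储")]

def pvProgressMapA : PySem.Dict String (PySem.Dict String String) := PySem.Dict.ofList
  [("interpret", PySem.Dict.ofList [("scope","completed"),("retrieval","running"),("evidence","pending"),("structure","pending"),("writing","pending"),("validation","pending"),("persist","pending")]),
   ("review",    PySem.Dict.ofList [("scope","completed"),("retrieval","completed"),("evidence","completed"),("structure","completed"),("writing","running"),("validation","pending"),("persist","pending")]),
   ("persist",   PySem.Dict.ofList [("scope","completed"),("retrieval","completed"),("evidence","completed"),("structure","completed"),("writing","completed"),("validation","completed"),("persist","running")]),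
   ("completed", PySem.Dict.ofList [("scope","completed"),("retrieval","completed"),("evidence","completed"),("structure","completed"),("writing","completed"),("validation","completed"),("persist","completed")])]

-- labels[item] / selected[item]: every item of pvOrderA is a key of both dicts, so the
-- getD default "" is never used — exact port of A's (never-raising) [] lookups.
def deep_todos_snapshot_py (stage : String) : List (List (String × String)) :=
  let selected :=
    match pvProgressMapA.get? stage with
    | some d => d
    | none => pvProgressMapA.getD "interpret" PySem.Dict.empty
  pvOrderA.map (fun item =>
    [("id", item), ("label", pvLabelsA.getD item ""), ("status", selected.getD item "")])

-- ===== PORT B =====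
def pvOrderB : List String := ["scope", "retrieval", "evidence", "structure", "writing", "validation", "persist"]

def pvLabelsB : PySem.Dict String String := PySem.Dict.ofList
  [("scope", "范围确认"), ("retrieval", "检索路由"), ("evidence", "证据整理"),
   ("structure", "结构分析"), ("writing", "文稿生成"), ("validation", "质量校验"),
   ("persist", "审批与存储")]

def pvBoundaryB : PySem.Dict String Int := PySem.Dict.ofList
  [("interpret", 1), ("review", 4), ("persist", 6), ("completed", 7)]

def deep_todos_snapshot_py_alt (stage : String) : List (List (String × String)) :=
  let boundary := pvBoundaryB.getD stage 1
  (PySem.List.enumerate pvOrderB).foldl (fun out (p : Int × String) =>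
    let status := if p.1 < boundary then "completed"
                  else if p.1 = boundary then "running"
                  else "pending"
    out ++ [[("id", p.2), ("label", pvLabelsB.getD p.2 ""), ("status", status)]]) []

-- ===== PRECONDITION & SPEC =====
def Spec_deep_todos_snapshot_py (stage : String) (out : List (List (String × String))) : Prop := out = deep_todos_snapshot_py_alt stage
instance (stage : String) (out : List (List (String × String))) : Decidable (Spec_deep_todos_snapshot_py stage out) := by unfold Spec_deep_todos_snapshot_py; infer_instance

-- ===== CLAIM (what is proved, stated in full; the proofs are below) =====
def Claim_equal_deep_todos_snapshot_py : Prop := ∀ (stage : String), Dom_deep_todos_snapshot_py stage → Spec_deep_todos_snapshot_py stage (deep_todos_snapshot_py stage)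

-- ===== LEMMAS AND PROOFS =====

-- Both programs look stage up in a literal four-key dict; on any stage other than those
-- four keys they compute exactly what they compute on "interpret".
lemma portA_default (stage : String) (h1 : stage ≠ "interpret") (h2 : stage ≠ "review")
    (h3 : stage ≠ "persist") (h4 : stage ≠ "completed") :
    deep_todos_snapshot_py stage = deep_todos_snapshot_py "interpret" := by
  simp [deep_todos_snapshot_py, pvProgressMapA, PySem.Dict.ofList, PySem.Dict.update,
    PySem.Dict.get?, PySem.Dict.insert, PySem.Dict.empty, PySem.Dict.contains, List.find?,
    show ("interpret" == stage) = false by simp [Ne.symm h1],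
    show ("review" == stage) = false by simp [Ne.symm h2],
    show ("persist" == stage) = false by simp [Ne.symm h3],
    show ("completed" == stage) = false by simp [Ne.symm h4]]
  decide

lemma portB_default (stage : String) (h1 : stage ≠ "interpret") (h2 : stage ≠ "review")
    (h3 : stage ≠ "persist") (h4 : stage ≠ "completed") :
    deep_todos_snapshot_py_alt stage = deep_todos_snapshot_py_alt "interpret" := by
  simp [deep_todos_snapshot_py_alt, pvBoundaryB, PySem.Dict.ofList, PySem.Dict.update,
    PySem.Dict.get?, PySem.Dict.insert, PySem.Dict.empty, PySem.Dict.contains, List.find?,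
    PySem.Dict.getD,
    show ("interpret" == stage) = false by simp [Ne.symm h1],
    show ("review" == stage) = false by simp [Ne.symm h2],
    show ("persist" == stage) = false by simp [Ne.symm h3],
    show ("completed" == stage) = false by simp [Ne.symm h4]]

-- ===== VERDICT (by name: the statement is the Claim_ definition above) =====
theorem deep_todos_snapshot_py_spec : Claim_equal_deep_todos_snapshot_py := by
  intro stage _
  show deep_todos_snapshot_py stage = deep_todos_snapshot_py_alt stage
  by_cases h1 : stage = "interpret"
  · subst h1; decide
  by_cases h2 : stage = "review"
  · subst h2; decide
  by_cases h3 : stage = "persist"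
  · subst h3; decide
  by_cases h4 : stage = "completed"
  · subst h4; decide
  rw [portA_default stage h1 h2 h3 h4, portB_default stage h1 h2 h3 h4]
  decide
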